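-- pv_equiv track=rewrite | github.com/aviswerdlow/k4 | 03_SOLVERS/zone_mask_v1/scripts/route_engine.py | apply
-- ===== SOURCE A (Python) =====
-- from typing import List, Dict, Any, Tuple
--
-- def apply(text: str, params: Dict[str, Any]) -> str:
--     rows = params.get('rows', 7)
--     cols = params.get('cols', 14)
--
--     # Create grid
--     grid = []
--     idx = 0
--     for r in range(rows):
--         row = []
--         for c in range(cols):
--             if idx < len(text):
--                 row.append(text[idx])
--                 idx += 1
--             else:
--                 row.append('')
--         grid.append(row)
--
--     # Read in serpentine pattern
--     result = []
--     for r in range(rows):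
--         if r % 2 == 0:
--             # Left to right
--             result.extend(grid[r])
--         else:
--             # Right to left
--             result.extend(reversed(grid[r]))
--
--     return ''.join(c for c in result if c)
-- ===== SOURCE B (Python) =====
-- def apply(text, params):
--     rows = params.get('rows', 7)
--     cols = max(params.get('cols', 14), 0)
--     out = []
--     for r in range(rows):
--         chunk = text[r * cols:(r + 1) * cols]
--         out.append(chunk if r % 2 == 0 else chunk[::-1])
--     return ''.join(out)
-- ===== Notes on version B (the rewrite author's own statement) =====
-- stated objective: simpler
-- what changed: B drops A's two-phase fill-a-padded-grid-then-read-it-back approach and emits each serpentine row directly as a text slice (reversed on odd rows), so no grid and no padding cells are ever materialised.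
import Mathlib
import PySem

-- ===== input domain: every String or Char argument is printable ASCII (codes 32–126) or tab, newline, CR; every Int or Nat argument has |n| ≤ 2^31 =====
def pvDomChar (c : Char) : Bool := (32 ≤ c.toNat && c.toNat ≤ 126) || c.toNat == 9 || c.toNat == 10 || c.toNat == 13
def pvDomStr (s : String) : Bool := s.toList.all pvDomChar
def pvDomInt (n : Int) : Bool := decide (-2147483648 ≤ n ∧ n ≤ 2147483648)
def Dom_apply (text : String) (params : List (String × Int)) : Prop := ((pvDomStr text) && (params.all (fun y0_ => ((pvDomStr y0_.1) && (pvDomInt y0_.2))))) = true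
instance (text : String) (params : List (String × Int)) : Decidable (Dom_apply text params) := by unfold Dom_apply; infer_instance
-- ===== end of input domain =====

-- B replaces A's two-phase fill-grid-then-read-grid with one slicing pass over the text
-- (chunk per row, reversed on odd rows): simpler, no padded grid is ever built.

-- ===== PORT A =====
-- Grid cells are Option Char: 'some c' for a stored character, 'none' for Python's '' padding
-- (the final join filters the empties, ported as filterMap id).  grid[r] is always in range in
-- the read loop, so pyGet? … |>.getD [] is exact there.
def apply (text : String) (params : List (String × Int)) : String :=
  let rows := PySem.Dict.getD (PySem.Dict.ofList params) "rows" 7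
  let cols := PySem.Dict.getD (PySem.Dict.ofList params) "cols" 14
  let tl := text.toList
  let built := (PySem.List.pyRange 0 rows 1).foldl
    (fun (st : List (List (Option Char)) × Nat) _r =>
      let inner := (PySem.List.pyRange 0 cols 1).foldl
        (fun (rs : List (Option Char) × Nat) _c =>
          if rs.2 < tl.length then (rs.1 ++ [tl[rs.2]?], rs.2 + 1)
          else (rs.1 ++ [none], rs.2))
        ([], st.2)
      (st.1 ++ [inner.1], inner.2))
    ([], 0)
  let grid := built.1
  let result := (PySem.List.pyRange 0 rows 1).foldl
    (fun (res : List (Option Char)) r =>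
      if PySem.Int.mod r 2 == 0 then res ++ ((PySem.List.pyGet? grid r).getD [])
      else res ++ ((PySem.List.pyGet? grid r).getD []).reverse)
    []
  String.ofList (result.filterMap id)

-- ===== PORT B =====
def apply_alt (text : String) (params : List (String × Int)) : String :=
  let rows := PySem.Dict.getD (PySem.Dict.ofList params) "rows" 7
  let cols := max (PySem.Dict.getD (PySem.Dict.ofList params) "cols" 14) 0
  let tl := text.toList
  let out := (PySem.List.pyRange 0 rows 1).foldl
    (fun (acc : List (List Char)) r =>
      let chunk := PySem.List.slice tl (some (r * cols)) (some ((r + 1) * cols))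
      acc ++ [if PySem.Int.mod r 2 == 0 then chunk else chunk.reverse])
    []
  String.ofList out.flatten

-- ===== PRECONDITION & SPEC =====
def Spec_apply (text : String) (params : List (String × Int)) (out : String) : Prop := out = apply_alt text params
instance (text : String) (params : List (String × Int)) (out : String) : Decidable (Spec_apply text params out) := by unfold Spec_apply; infer_instance

-- ===== CLAIM (what is proved, stated in full; the proofs are below) =====
def Claim_equal_apply : Prop := ∀ (text : String) (params : List (String × Int)), Dom_apply text params → Spec_apply text params (apply text params)

-- ===== LEMMAS AND PROOFS =====

-- Row r of A's grid, as a function of the flat start offset s and the row width C.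
def rowSpec (tl : List Char) (s C : Nat) : List (Option Char) :=
  (List.range C).map (fun c => tl[s + c]?)

def gridSpec (tl : List Char) (C s n : Nat) : List (List (Option Char)) :=
  (List.range n).map (fun i => rowSpec tl (s + i * C) C)

lemma rowSpec_succ (tl : List Char) (s C : Nat) :
    rowSpec tl s (C + 1) = tl[s]? :: rowSpec tl (s + 1) C := by
  simp only [rowSpec, List.range_succ_eq_map, List.map_cons, List.map_map, Nat.add_zero]
  congr 1
  exact List.map_congr_left fun c _ => by
    have : s + (c + 1) = s + 1 + c := by omega
    simp [Function.comp, this]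

lemma gridSpec_succ (tl : List Char) (C s n : Nat) :
    gridSpec tl C s (n + 1) = rowSpec tl s C :: gridSpec tl C (s + C) n := by
  simp only [gridSpec, List.range_succ_eq_map, List.map_cons, List.map_map, Nat.zero_mul, Nat.add_zero]
  congr 1
  exact List.map_congr_left fun i _ => by
    have : s + (i + 1) * C = s + C + i * C := by ring
    simp [Function.comp, this]

lemma innerFold (tl : List Char) (l : List Int) (acc : List (Option Char)) (s : Nat) :
    l.foldl
      (fun (rs : List (Option Char) × Nat) _c =>
        if rs.2 < tl.length then (rs.1 ++ [tl[rs.2]?], rs.2 + 1)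
        else (rs.1 ++ [none], rs.2))
      (acc, min s tl.length)
    = (acc ++ rowSpec tl s l.length, min (s + l.length) tl.length) := by
  induction l generalizing acc s with
  | nil => simp [rowSpec]
  | cons x t ih =>
    simp only [List.foldl_cons, List.length_cons]
    by_cases h : s < tl.length
    · have h1 : min s tl.length = s := by omega
      rw [h1]
      simp only [h, if_pos]
      rw [show ((acc ++ [tl[s]?], s + 1) : List (Option Char) × Nat)
            = (acc ++ [tl[s]?], min (s + 1) tl.length) from by
          rw [show min (s + 1) tl.length = s + 1 from by omega]]
      rw [ih, rowSpec_succ]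
      simp only [Prod.mk.injEq]
      exact ⟨by simp, by omega⟩
    · have h1 : min s tl.length = tl.length := by omega
      simp only [h1, lt_irrefl, if_false]
      rw [show ((acc ++ [none], tl.length) : List (Option Char) × Nat)
            = (acc ++ [(none : Option Char)], min (s + 1) tl.length) from by
          rw [show min (s + 1) tl.length = tl.length from by omega]]
      rw [ih, rowSpec_succ]
      have h3 : tl[s]? = none := List.getElem?_eq_none (by omega)
      rw [h3]
      simp only [Prod.mk.injEq]
      exact ⟨by simp, by omega⟩

lemma outerFold (tl : List Char) (cols : Int) (l : List Int)
    (gacc : List (List (Option Char))) (s : Nat) :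
    l.foldl
      (fun (st : List (List (Option Char)) × Nat) _r =>
        let inner := (PySem.List.pyRange 0 cols 1).foldl
          (fun (rs : List (Option Char) × Nat) _c =>
            if rs.2 < tl.length then (rs.1 ++ [tl[rs.2]?], rs.2 + 1)
            else (rs.1 ++ [none], rs.2))
          ([], st.2)
        (st.1 ++ [inner.1], inner.2))
      (gacc, min s tl.length)
    = (gacc ++ gridSpec tl cols.toNat s l.length,
       min (s + l.length * cols.toNat) tl.length) := by
  have hC : (PySem.List.pyRange 0 cols 1).length = cols.toNat := by
    simp [PySem.List.length_pyRange_one]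
  induction l generalizing gacc s with
  | nil => simp [gridSpec]
  | cons x t ih =>
    simp only [List.foldl_cons]
    rw [innerFold tl (PySem.List.pyRange 0 cols 1) [] s, hC]
    simp only [List.nil_append]
    rw [ih]
    simp only [List.length_cons]
    rw [gridSpec_succ]
    simp only [Prod.mk.injEq]
    refine ⟨by simp, ?_⟩
    have : s + (t.length + 1) * cols.toNat = s + cols.toNat + t.length * cols.toNat := by ring
    omega

lemma rowSpec_eq (tl : List Char) (s C : Nat) :
    rowSpec tl s C = ((tl.drop s).take C).map some ++ List.replicate (C - (tl.length - s)) none := by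
  induction C generalizing s with
  | zero => simp [rowSpec]
  | succ C ih =>
    rw [rowSpec_succ, ih]
    by_cases h : s < tl.length
    · have hd : tl.drop s = tl[s] :: tl.drop (s + 1) := List.drop_eq_getElem_cons h
      have hg : tl[s]? = some tl[s] := List.getElem?_eq_getElem h
      rw [hd, hg]
      simp only [List.take_succ_cons, List.map_cons, List.cons_append]
      have : C + 1 - (tl.length - s) = C - (tl.length - (s + 1)) := by omega
      rw [this]
    · have hd : tl.drop s = [] := List.drop_eq_nil_of_le (by omega)
      have hd1 : tl.drop (s + 1) = [] := List.drop_eq_nil_of_le (by omega)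
      have hg : tl[s]? = none := List.getElem?_eq_none (by omega)
      rw [hd, hd1, hg]
      simp only [List.take_nil, List.map_nil, List.nil_append]
      have e1 : C + 1 - (tl.length - s) = C + 1 := by omega
      have e2 : C - (tl.length - (s + 1)) = C := by omega
      rw [e1, e2]
      rfl

lemma filterMap_rowSpec (tl : List Char) (s C : Nat) :
    (rowSpec tl s C).filterMap (fun x => x) = (tl.drop s).take C := by
  rw [rowSpec_eq, List.filterMap_append, List.filterMap_map]
  simp

lemma slice_chunk (tl : List Char) (k C : Nat) :
    PySem.List.slice tl (some ((k : Int) * (C : Int))) (some (((k : Int) + 1) * (C : Int)))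
      = (tl.drop (k * C)).take C := by
  rw [show ((k : Int) + 1) * (C : Int) = ((k * C : Nat) : Int) + (C : Int) by push_cast; ring,
      show (k : Int) * (C : Int) = ((k * C : Nat) : Int) by push_cast; ring,
      PySem.List.slice_natCast_add]

lemma mod_two_beq (k : Nat) : (PySem.Int.mod (k : Int) 2 == 0) = (k % 2 == 0) := by
  have h : PySem.Int.mod (k : Int) 2 = ((k % 2 : Nat) : Int) := by
    exact_mod_cast PySem.Int.mod_natCast k 2
  rw [h]
  rcases Nat.mod_two_eq_zero_or_one k with h2 | h2 <;> rw [h2] <;> rfl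

-- ===== VERDICT (by name: the statement is the Claim_ definition above) =====
theorem apply_spec : Claim_equal_apply := by
  intro text params _
  show apply text params = apply_alt text params
  unfold apply apply_alt
  dsimp only
  set tl := text.toList with htl
  set rows := PySem.Dict.getD (PySem.Dict.ofList params) "rows" 7 with hrows
  set cols := PySem.Dict.getD (PySem.Dict.ofList params) "cols" 14 with hcols
  rw [show (([], 0) : List (List (Option Char)) × Nat) = ([], min 0 tl.length) from by simp]
  rw [outerFold tl cols (PySem.List.pyRange 0 rows 1) [] 0]
  rw [show max cols 0 = ((cols.toNat : Int)) from (Int.ofNat_toNat cols).symm]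
  set C := cols.toNat with hC
  rw [PySem.List.pyRange_zero rows]
  set R := rows.toNat with hR
  simp only [List.nil_append, List.length_map, List.length_range]
  set G := gridSpec tl C 0 R with hG
  rw [show (fun (res : List (Option Char)) (r : Int) =>
        if PySem.Int.mod r 2 == 0 then res ++ ((PySem.List.pyGet? G r).getD [])
        else res ++ ((PySem.List.pyGet? G r).getD []).reverse)
      = (fun (res : List (Option Char)) (r : Int) =>
        res ++ (if PySem.Int.mod r 2 == 0 then ((PySem.List.pyGet? G r).getD [])
                else ((PySem.List.pyGet? G r).getD []).reverse))
    from funext fun res => funext fun r => by split <;> rfl]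
  rw [PySem.List.foldl_append_eq_flatMap, PySem.List.foldl_append_singleton_eq_map]
  simp only [List.nil_append]
  rw [List.flatten_eq_flatMap, List.filterMap_flatMap, List.flatMap_map, List.flatMap_map, List.flatMap_map]
  congr 1
  apply List.flatMap_congr
  intro k hk
  rw [List.mem_range] at hk
  have hget : PySem.List.pyGet? G (k : Int) = some (rowSpec tl (0 + k * C) C) := by
    rw [show PySem.List.pyGet? G (k : Int) = G[k]? from by simp [pysem], hG, gridSpec,
        List.getElem?_map, List.getElem?_range hk]
    rfl
  rw [mod_two_beq, hget]
  by_cases hpar : k % 2 = 0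
  · simp only [hpar, beq_self_eq_true, if_true, Option.getD_some, id_eq]
    rw [filterMap_rowSpec, slice_chunk]
    simp
  · have : (k % 2 == 0) = false := by simp [hpar]
    simp only [this, Bool.false_eq_true, if_false, Option.getD_some, id_eq]
    rw [List.filterMap_reverse, filterMap_rowSpec, slice_chunk]
    simp
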